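-- pv_equiv track=rewrite | github.com/Dragooz/LeetCode_Solutions | Biweekly Contest 34/1573. Number of Ways to Split a String.py | numWays
-- ===== SOURCE A (Python) =====
-- def numWays(s: str) -> int:
--     n = len(s)
--     index = []
--     sum_ = 0
--
--     for i, char in enumerate(s):
--         if char == '1':
--             sum_ += 1
--             index.append(i)
--
--     if sum_%3 != 0:
--         return 0
--
--     num_split = sum_//3
--
--     if index:
--         return (index[num_split]-index[num_split-1]) * (index[num_split*2]-index[num_split*2-1]) % (10**9 +7)
--     else:
--         return ((n-2) * (n-1) // 2  )% (10**9 +7)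
-- ===== SOURCE B (Python) =====
-- def numWays(s: str) -> int:
--     MOD = 10**9 + 7
--     t = s.count('1')
--     if t % 3:
--         return 0
--     n = len(s)
--     if t == 0:
--         return (n - 2) * (n - 1) // 2 % MOD
--     a = t // 3
--     b = 2 * a
--     ones = ways1 = ways2 = 0
--     for ch in s:
--         if ch == '1':
--             ones += 1
--         if ones == a:
--             ways1 += 1
--         elif ones == b:
--             ways2 += 1
--     return ways1 * ways2 % MOD
-- ===== Notes on version B (the rewrite author's own statement) =====
-- stated objective: faster
-- what changed: B drops A's stored list of one-indices entirely: it counts the ones with str.count, then in a single scan accumulates two counters of positions whose running prefix one-count equals t/3 resp. 2t/3, multiplying the counters instead of subtracting stored indices.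
import Mathlib
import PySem

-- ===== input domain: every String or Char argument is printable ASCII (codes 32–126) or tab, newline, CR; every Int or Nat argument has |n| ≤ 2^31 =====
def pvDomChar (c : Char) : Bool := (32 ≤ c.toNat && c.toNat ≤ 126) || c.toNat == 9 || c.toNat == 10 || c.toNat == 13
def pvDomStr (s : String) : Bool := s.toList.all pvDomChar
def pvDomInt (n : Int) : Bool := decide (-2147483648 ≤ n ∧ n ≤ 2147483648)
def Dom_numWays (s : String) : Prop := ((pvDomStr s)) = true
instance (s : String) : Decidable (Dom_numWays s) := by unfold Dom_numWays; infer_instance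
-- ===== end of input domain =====

-- B replaces A's stored index list by two counters of boundary-prefix positions accumulated in one scan (measured faster by a constant factor).


-- ===== PORT A =====
-- literal port of A; pyGetD with default 0 is only reached with provably in-range indices (Python never raises here)
def numWays (s : String) : Int :=
  let n : Int := (PySem.Str.len s : Int)
  let r := (PySem.List.enumerate s.toList 0).foldl
      (fun (acc : Int × List Int) p => if p.2 = '1' then (acc.1 + 1, acc.2 ++ [p.1]) else acc)
      (0, [])
  let sum_ := r.1
  let index := r.2
  if PySem.Int.mod sum_ 3 ≠ 0 then 0
  else
    let num_split := PySem.Int.floordiv sum_ 3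
    if index ≠ [] then
      PySem.Int.mod ((PySem.List.pyGetD index num_split 0 - PySem.List.pyGetD index (num_split - 1) 0) *
        (PySem.List.pyGetD index (num_split * 2) 0 - PySem.List.pyGetD index (num_split * 2 - 1) 0)) (10 ^ 9 + 7)
    else PySem.Int.mod (PySem.Int.floordiv ((n - 2) * (n - 1)) 2) (10 ^ 9 + 7)

-- ===== PORT B =====
def numWays_alt (s : String) : Int :=
  let M : Int := 10 ^ 9 + 7
  let t : Int := (PySem.Str.count s "1" : Int)
  if PySem.Int.mod t 3 ≠ 0 then 0
  else
    let n : Int := (PySem.Str.len s : Int)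
    if t = 0 then PySem.Int.mod (PySem.Int.floordiv ((n - 2) * (n - 1)) 2) M
    else
      let a := PySem.Int.floordiv t 3
      let b := 2 * a
      let r := s.toList.foldl
        (fun (acc : Int × Int × Int) ch =>
          let ones := if ch = '1' then acc.1 + 1 else acc.1
          if ones = a then (ones, acc.2.1 + 1, acc.2.2)
          else if ones = b then (ones, acc.2.1, acc.2.2 + 1)
          else (ones, acc.2.1, acc.2.2))
        (0, 0, 0)
      PySem.Int.mod (r.2.1 * r.2.2) M

-- ===== PRECONDITION & SPEC =====
def Spec_numWays (s : String) (out : Int) : Prop := out = numWays_alt s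
instance (s : String) (out : Int) : Decidable (Spec_numWays s out) := by unfold Spec_numWays; infer_instance

-- ===== CLAIM (what is proved, stated in full; the proofs are below) =====
def Claim_equal_numWays : Prop := ∀ (s : String), Dom_numWays s → Spec_numWays s (numWays s)

-- ===== LEMMAS AND PROOFS =====

def onesPos : List Char → Int → List Int
  | [], _ => []
  | c :: tl, k => if c = '1' then k :: onesPos tl (k + 1) else onesPos tl (k + 1)

theorem length_onesPos (l : List Char) (k : Int) : (onesPos l k).length = l.count '1' := by
  induction l generalizing k with
  | nil => simp [onesPos]
  | cons c tl ih =>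
    by_cases h : c = '1' <;> simp [onesPos, h, ih]

theorem countGo_one (l : List Char) (fuel : Nat) (acc : Nat) (h : l.length ≤ fuel) :
    PySem.Chars.count.go ['1'] fuel l acc = acc + l.count '1' := by
  induction l generalizing fuel acc with
  | nil => cases fuel <;> simp [PySem.Chars.count.go]
  | cons c tl ih =>
    cases fuel with
    | zero => simp at h
    | succ f =>
      rw [PySem.Chars.count.go]
      by_cases hc : c = '1'
      · subst hc
        simp only [List.isPrefixOf, List.length_singleton, List.drop_succ_cons, List.drop_zero,
          beq_self_eq_true, Bool.true_and, List.isPrefixOf]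
        simp [ih f (acc+1) (by simp at h; omega)]
        omega
      · have hp : List.isPrefixOf ['1'] (c :: tl) = false := by
          simp [List.isPrefixOf]; intro hh; exact hc hh.symm
        simp [hp, ih f acc (by simp at h; omega), hc]

theorem count_one (s : String) : PySem.Str.count s "1" = s.toList.count '1' := by
  rw [PySem.Str.count_eq]
  have : ("1" : String).toList = ['1'] := rfl
  rw [this, PySem.Chars.count]
  simp [countGo_one s.toList s.length 0 (by simp)]

def cntE : List Char → Int → Int → Int
  | [], _, _ => 0
  | c :: tl, o, m =>
    let o' := if c = '1' then o + 1 else o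
    (if o' = m then 1 else 0) + cntE tl o' m

theorem foldA (l : List Char) (k c : Int) (acc : List Int) :
    (PySem.List.enumerate l k).foldl
      (fun (acc : Int × List Int) p => if p.2 = '1' then (acc.1 + 1, acc.2 ++ [p.1]) else acc)
      (c, acc) = (c + l.count '1', acc ++ onesPos l k) := by
  induction l generalizing k c acc with
  | nil => simp [PySem.List.enumerate_nil, onesPos]
  | cons x tl ih =>
    rw [PySem.List.enumerate_cons]
    by_cases h : x = '1' <;>
      simp [List.foldl_cons, h, ih, onesPos, List.count_cons] <;> ring_nf

theorem foldB (a b : Int) (hab : a ≠ b) (l : List Char) (o w1 w2 : Int) :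
    l.foldl
      (fun (acc : Int × Int × Int) ch =>
        let ones := if ch = '1' then acc.1 + 1 else acc.1
        if ones = a then (ones, acc.2.1 + 1, acc.2.2)
        else if ones = b then (ones, acc.2.1, acc.2.2 + 1)
        else (ones, acc.2.1, acc.2.2))
      (o, w1, w2) = (o + l.count '1', w1 + cntE l o a, w2 + cntE l o b) := by
  induction l generalizing o w1 w2 with
  | nil => simp [cntE]
  | cons c tl ih =>
    simp only [List.foldl_cons]
    by_cases hc : c = '1'
    · simp only [hc, ↓reduceIte]
      by_cases ha : o + 1 = a
      · have hb : ¬(o + 1 = b) := fun h => hab (ha.symm.trans h)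
        rw [if_pos ha, ih]; simp [cntE, hc, ha, hb, List.count_cons, Prod.mk.injEq]
        try omega
      · rw [if_neg ha]
        by_cases hb : o + 1 = b
        · rw [if_pos hb, ih]; simp [cntE, hc, ha, hb, List.count_cons, Prod.mk.injEq]
          try omega
        · rw [if_neg hb, ih]; simp [cntE, hc, ha, hb, List.count_cons, Prod.mk.injEq]
          try omega
    · simp only [hc, ↓reduceIte]
      by_cases ha : o = a
      · have hb : ¬(o = b) := fun h => hab (ha.symm.trans h)
        rw [if_pos ha, ih]; simp [cntE, hc, ha, hb, List.count_cons, Prod.mk.injEq]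
        try omega
      · rw [if_neg ha]
        by_cases hb : o = b
        · rw [if_pos hb, ih]; simp [cntE, hc, ha, hb, List.count_cons, Prod.mk.injEq]
          try omega
        · rw [if_neg hb, ih]; simp [cntE, hc, ha, hb, List.count_cons, Prod.mk.injEq]
          try omega

theorem cntE_lt (l : List Char) (o m : Int) (h : m < o) : cntE l o m = 0 := by
  induction l generalizing o with
  | nil => simp [cntE]
  | cons c tl ih =>
    by_cases hc : c = '1'
    · simp [cntE, hc, (show ¬ (o + 1 = m) by omega), ih (o + 1) (by omega)]
    · simp [cntE, hc, (show ¬ (o = m) by omega), ih o h]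

theorem cntE_gap (l : List Char) (k o m : Int) (hom : o ≤ m)
    (hlt : (m - o).toNat < l.count '1') :
    cntE l o m = (onesPos l k).getD (m - o).toNat 0 -
      (if m = o then k else (onesPos l k).getD ((m - o).toNat - 1) 0) := by
  induction l generalizing k o with
  | nil => simp at hlt
  | cons c tl ih =>
    by_cases hc : c = '1'
    · subst hc
      have hcnt : (m - o).toNat < tl.count '1' + 1 := by
        simpa [List.count_cons] using hlt
      simp only [cntE, onesPos, ↓reduceIte]
      by_cases hmo : m = o
      · subst hmo
        simp [cntE_lt tl (m + 1) m (by omega), (show ¬(m + 1 = m) by omega)]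
      · have hom' : m + 1 ≤ m + 1 := le_rfl
        by_cases hm1 : m = o + 1
        · have h1 : (m - o).toNat = 1 := by omega
          rw [ih (k + 1) (o + 1) (by omega) (by omega)]
          simp [hm1, h1, hmo]
          omega
        · obtain ⟨e, he⟩ : ∃ e, (m - (o + 1)).toNat = e + 1 := ⟨(m - (o + 1)).toNat - 1, by omega⟩
          have h2 : (m - o).toNat = e + 2 := by omega
          rw [ih (k + 1) (o + 1) (by omega) (by omega)]
          rw [h2, he, if_neg hmo, if_neg hm1, if_neg (show ¬(o + 1 = m) by omega)]
          simp only [List.getD_cons_succ,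
            (show e + 2 - 1 = e + 1 from rfl), (show e + 1 - 1 = e from rfl)]
          omega
    · have hcnt : (m - o).toNat < tl.count '1' := by
        simpa [List.count_cons, hc] using hlt
      simp only [cntE, onesPos, hc, ↓reduceIte]
      rw [ih (k + 1) o hom hcnt]
      by_cases hmo : m = o
      · simp [hmo]
        omega
      · have hom2 : ¬(o = m) := fun h => hmo h.symm
        simp [hmo, hom2]

theorem pyGetD_nonneg_toNat (xs : List Int) (i : Int) (hi : 0 ≤ i) :
    PySem.List.pyGetD xs i 0 = xs.getD i.toNat 0 := by
  obtain ⟨n, rfl⟩ := Int.eq_ofNat_of_zero_le hi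
  simp

-- ===== VERDICT (by name: the statement is the Claim_ definition above) =====
theorem numWays_spec : Claim_equal_numWays := by
  intro s _
  unfold Spec_numWays numWays numWays_alt
  rw [count_one]
  simp only [foldA s.toList 0 0 [], List.nil_append, zero_add]
  by_cases h3 : PySem.Int.mod (s.toList.count '1' : Int) 3 = 0
  · simp only [h3, ne_eq, not_true_eq_false, if_false]
    by_cases hc0 : s.toList.count '1' = 0
    · have hP : onesPos s.toList 0 = [] := by
        have := length_onesPos s.toList 0
        rw [hc0] at this
        exact List.eq_nil_of_length_eq_zero this
      simp [hP, hc0]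
    · have hne : (s.toList.count '1' : Int) ≠ 0 := by exact_mod_cast hc0
      have hdvd : (3 : Int) ∣ (s.toList.count '1' : Int) :=
        (PySem.Int.mod_eq_zero_iff_dvd _ _).mp h3
      obtain ⟨a, ha⟩ := hdvd
      have hfl : PySem.Int.floordiv (s.toList.count '1' : Int) 3 = a := by
        rw [PySem.Int.floordiv_eq_ediv_of_pos (by norm_num)]; omega
      have ha1 : 1 ≤ a := by omega
      have hPne : onesPos s.toList 0 ≠ [] := by
        intro h
        have := length_onesPos s.toList 0
        rw [h] at this
        simp at this
        omega
      rw [hfl]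
      simp only [hne, if_false, hPne, not_false_eq_true, if_true]
      rw [foldB a (2 * a) (by omega) s.toList 0 0 0]
      simp only [zero_add]
      rw [cntE_gap s.toList 0 0 a (by omega) (by omega),
          cntE_gap s.toList 0 0 (2 * a) (by omega) (by omega)]
      rw [if_neg (show ¬(a = 0) by omega), if_neg (show ¬(2 * a = 0) by omega)]
      rw [pyGetD_nonneg_toNat _ a (by omega), pyGetD_nonneg_toNat _ (a - 1) (by omega),
          pyGetD_nonneg_toNat _ (a * 2) (by omega), pyGetD_nonneg_toNat _ (a * 2 - 1) (by omega)]
      have h1 : (a - 1).toNat = a.toNat - 1 := by omega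
      have h2 : (a * 2).toNat = (2 * a).toNat := by omega
      have h3' : (a * 2 - 1).toNat = (2 * a).toNat - 1 := by omega
      have h4 : (a - 0).toNat = a.toNat := by omega
      have h5 : (2 * a - 0).toNat = (2 * a).toNat := by omega
      rw [h1, h2, h3', h4, h5]
  · simp only [h3, ne_eq, not_false_eq_true, if_true]
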